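-- pv_equiv track=rewrite | github.com/BejaLab/opsintools | colab/colab_utils.py | build_number_track
-- ===== SOURCE A (Python) =====
-- def build_number_track(sequence, start_idx):
--     track = [' '] * len(sequence)
--     current_idx = start_idx
--     for j, char in enumerate(sequence):
--         if char.isalpha():
--             current_idx += 1
--             if current_idx % 10 == 0:
--                 num_str = str(current_idx)
--                 for k, digit in enumerate(num_str):
--                     if j + k < len(track):
--                         track[j + k] = digit
--                     else:
--                         track.append(digit)
--
--     return "".join(track), current_idx
-- ===== SOURCE B (Python) =====
-- def build_number_track(sequence, start_idx):
--     # pass 1: markers (column, str(idx)) at residues that are multiples of 10, plus final idx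
--     idx = start_idx
--     markers = []
--     for j, ch in enumerate(sequence):
--         if ch.isalpha():
--             idx += 1
--             if idx % 10 == 0:
--                 markers.append((j, str(idx)))
--     length = len(sequence)
--     for j, s in markers:
--         length = max(length, j + len(s))
--     # pass 2: interval sweep — no buffer mutation: walk the columns once keeping the list of
--     # markers whose digit span covers the current column; the most recent one wins (it is the
--     # last element, since marker columns strictly increase), so each output char is read off it.
--     out = []
--     active = []
--     mi = 0
--     for i in range(length):
--         if mi < len(markers) and markers[mi][0] == i:
--             active.append(markers[mi])
--             mi += 1
--         active = [(j, s) for j, s in active if i < j + len(s)]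
--         out.append(active[-1][1][i - active[-1][0]] if active else ' ')
--     return "".join(out), idx
-- ===== Notes on version B (the rewrite author's own statement) =====
-- stated objective: alternative
-- what changed: A mutates a growing character buffer, writing or appending each marker's digits as it scans; B never mutates a buffer: it collects the (column, number-string) markers, then generates the output column by column with an interval sweep that maintains the list of markers covering the current column and reads each character off the most recent covering marker (or a space).
import Mathlib
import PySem

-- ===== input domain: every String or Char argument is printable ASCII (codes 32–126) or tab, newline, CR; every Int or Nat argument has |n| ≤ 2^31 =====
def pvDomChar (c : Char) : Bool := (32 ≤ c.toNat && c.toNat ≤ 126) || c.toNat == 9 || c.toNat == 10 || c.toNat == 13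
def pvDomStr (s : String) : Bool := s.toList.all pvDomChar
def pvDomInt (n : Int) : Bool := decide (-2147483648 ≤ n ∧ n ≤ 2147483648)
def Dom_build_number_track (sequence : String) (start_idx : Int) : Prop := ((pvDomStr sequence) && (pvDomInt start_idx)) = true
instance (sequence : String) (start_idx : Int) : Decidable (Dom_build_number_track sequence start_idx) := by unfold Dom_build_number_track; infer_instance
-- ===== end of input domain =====

-- B replaces A's mutate-or-append buffer by an interval sweep: collect the markers, then
-- generate the output column by column from the markers covering each column (objective: alternative).

-- ===== PORT A =====
-- inner loop: for k, digit in enumerate(num_str): set if in range else append (p = j + k)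
def pvWriteA (track : List Char) (p : Nat) : List Char → List Char
  | [] => track
  | d :: ds => pvWriteA (if p < track.length then track.set p d else track ++ [d]) (p + 1) ds

-- outer loop: for j, char in enumerate(sequence), state (track, current_idx)
def pvLoopA (track : List Char) (idx : Int) (j : Nat) : List Char → List Char × Int
  | [] => (track, idx)
  | c :: cs =>
    if PySem.Chars.isalpha c then
      if PySem.Int.mod (idx + 1) 10 == 0 then
        pvLoopA (pvWriteA track j (PySem.Int.toChars (idx + 1))) (idx + 1) (j + 1) cs
      else pvLoopA track (idx + 1) (j + 1) cs
    else pvLoopA track idx (j + 1) cs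

def build_number_track (sequence : String) (start_idx : Int) : String × Int :=
  let cs := sequence.toList
  let r := pvLoopA (List.replicate cs.length ' ') start_idx 0 cs
  (String.ofList r.1, r.2)

-- ===== PORT B =====
-- pass 1: markers (column, str(idx)) for each residue hitting a multiple of 10, plus final idx
def pvCollect (j : Nat) (idx : Int) : List Char → List (Nat × List Char) × Int
  | [] => ([], idx)
  | c :: cs =>
    if PySem.Chars.isalpha c then
      if PySem.Int.mod (idx + 1) 10 == 0 then
        let r := pvCollect (j + 1) (idx + 1) cs
        ((j, PySem.Int.toChars (idx + 1)) :: r.1, r.2)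
      else pvCollect (j + 1) (idx + 1) cs
    else pvCollect (j + 1) idx cs

-- pass 2: the sweep over columns i, i+1, … (n columns left); `rest` is markers[mi:], `active`
-- the covering markers.  active[-1][1][i - active[-1][0]] is in range whenever active is the
-- sweep's own active list (maintained so every element covers column i), so List.getD is exact there.
-- if mi < len(markers) and markers[mi][0] == i: active.append(markers[mi]); mi += 1
def pvStepB (active rest : List (Nat × List Char)) (i : Nat) :
    List (Nat × List Char) × List (Nat × List Char) :=
  match rest with
  | m :: rs => if m.1 == i then (active ++ [m], rs) else (active, m :: rs)
  | [] => (active, [])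

def pvSweepB (active rest : List (Nat × List Char)) (i n : Nat) : List Char :=
  match n with
  | 0 => []
  | n + 1 =>
    let st := pvStepB active rest i
    let act := st.1.filter (fun m => i < m.1 + m.2.length)
    let c := match act.getLast? with
      | some m => m.2.getD (i - m.1) ' '
      | none => ' '
    c :: pvSweepB act st.2 (i + 1) n

def build_number_track_alt (sequence : String) (start_idx : Int) : String × Int :=
  let cs := sequence.toList
  let r := pvCollect 0 start_idx cs
  let L := r.1.foldl (fun a m => max a (m.1 + m.2.length)) cs.length
  (String.ofList (pvSweepB [] r.1 0 L), r.2)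

-- ===== PRECONDITION & SPEC =====
def Spec_build_number_track (sequence : String) (start_idx : Int) (out : String × Int) : Prop := out = build_number_track_alt sequence start_idx
instance (sequence : String) (start_idx : Int) (out : String × Int) : Decidable (Spec_build_number_track sequence start_idx out) := by unfold Spec_build_number_track; infer_instance

-- ===== CLAIM (what is proved, stated in full; the proofs are below) =====
def Claim_equal_build_number_track : Prop := ∀ (sequence : String) (start_idx : Int), Dom_build_number_track sequence start_idx → Spec_build_number_track sequence start_idx (build_number_track sequence start_idx)

-- ===== LEMMAS AND PROOFS =====

-- does marker m cover column i?
def pvCovers (i : Nat) (m : Nat × List Char) : Bool := decide (m.1 ≤ i ∧ i < m.1 + m.2.length)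

theorem pvWriteA_length (s : List Char) (t : List Char) (p : Nat) (hp : p ≤ t.length) :
    (pvWriteA t p s).length = max t.length (p + s.length) := by
  induction s generalizing t p with
  | nil => simp [pvWriteA, Nat.max_eq_left (by omega)]
  | cons d ds ih =>
    simp only [pvWriteA]
    split
    · rw [ih _ _ (by simp; omega)]; simp; omega
    · rw [ih _ _ (by simp; omega)]; simp; omega

theorem pvWriteA_getElem? (s : List Char) (t : List Char) (p : Nat) (hp : p ≤ t.length) (i : Nat) :
    (pvWriteA t p s)[i]? = if p ≤ i ∧ i < p + s.length then s[i - p]? else t[i]? := by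
  induction s generalizing t p with
  | nil =>
    simp only [pvWriteA, List.length_nil, Nat.add_zero]
    rw [if_neg (by omega)]
  | cons d ds ih =>
    simp only [pvWriteA, List.length_cons]
    by_cases hlen : p < t.length
    · simp only [if_pos hlen]
      rw [ih _ _ (by simp; omega)]
      by_cases h1 : p + 1 ≤ i ∧ i < p + 1 + ds.length
      · rw [if_pos h1, if_pos (by omega)]
        have : i - p = (i - (p + 1)) + 1 := by omega
        simp [this]
      · rw [if_neg h1]
        by_cases h2 : i = p
        · subst h2
          rw [if_pos (by omega)]
          simp [hlen]
        · rw [if_neg (by omega), List.getElem?_set_ne (by omega)]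
    · have hpe : p = t.length := by omega
      simp only [if_neg hlen]
      rw [ih _ _ (by simp; omega)]
      by_cases h1 : p + 1 ≤ i ∧ i < p + 1 + ds.length
      · rw [if_pos h1, if_pos (by omega)]
        have : i - p = (i - (p + 1)) + 1 := by omega
        simp [this]
      · rw [if_neg h1]
        by_cases h2 : i = p
        · subst h2
          rw [if_pos (by omega)]
          simp [hpe]
        · rw [if_neg (by omega)]
          rcases Nat.lt_or_ge i t.length with h | h
          · rw [List.getElem?_append_left h]
          · rw [List.getElem?_eq_none (show (t ++ [d]).length ≤ i by simp; omega),
                List.getElem?_eq_none (show t.length ≤ i by omega)]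

def pvFoldA (t : List Char) (ms : List (Nat × List Char)) : List Char :=
  ms.foldl (fun t m => pvWriteA t m.1 m.2) t

-- fold of writes, read back: the LAST covering marker wins, else the base track
theorem pvFoldA_getElem? (ms : List (Nat × List Char)) (t : List Char)
    (h : ∀ m ∈ ms, m.1 ≤ t.length) (i : Nat) :
    (pvFoldA t ms)[i]? =
      match (ms.filter (pvCovers i)).getLast? with
      | some m => m.2[i - m.1]?
      | none => t[i]? := by
  induction ms generalizing t with
  | nil => simp [pvFoldA]
  | cons m ms ih =>
    have hm := h m (by simp)
    have hrest : ∀ m' ∈ ms, m'.1 ≤ (pvWriteA t m.1 m.2).length := by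
      intro m' hm'
      rw [pvWriteA_length _ _ _ hm]
      exact le_trans (h m' (by simp [hm'])) (by omega)
    simp only [pvFoldA, List.foldl_cons]
    rw [show (List.foldl (fun t m => pvWriteA t m.1 m.2) (pvWriteA t m.1 m.2) ms) = pvFoldA (pvWriteA t m.1 m.2) ms from rfl]
    rw [ih _ hrest]
    by_cases hc : pvCovers i m = true
    · rw [List.filter_cons_of_pos hc]
      cases hh : ms.filter (pvCovers i) with
      | cons a l =>
        rw [List.getLast?_cons_cons]
        cases hx : (a :: l).getLast? with
        | some m' => rfl
        | none => simp at hx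
      | nil =>
        simp only [List.getLast?_nil, List.getLast?_singleton]
        rw [pvWriteA_getElem? _ _ _ hm i, if_pos (by simpa [pvCovers] using hc)]
    · rw [List.filter_cons_of_neg hc]
      cases hlast : (ms.filter (pvCovers i)).getLast? with
      | some m' => rfl
      | none =>
        simp only
        rw [pvWriteA_getElem? _ _ _ hm i, if_neg (by simpa [pvCovers] using hc)]

-- the sweep reads off, at each column, the last covering marker of the full marker list
theorem pvSweepB_spec (n : Nat) :
    ∀ (ms done rest active : List (Nat × List Char)) (i : Nat),
    ms = done ++ rest →
    (∀ m ∈ done, m.1 < i) →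
    (∀ m ∈ rest, i ≤ m.1) →
    rest.Pairwise (fun a b => a.1 < b.1) →
    active = done.filter (fun m => i ≤ m.1 + m.2.length) →
    pvSweepB active rest i n =
      (List.range' i n).map (fun k =>
        match (ms.filter (pvCovers k)).getLast? with
        | some m => m.2.getD (k - m.1) ' '
        | none => ' ') := by
  induction n with
  | zero => intro ms done rest active i _ _ _ _ _; simp [pvSweepB]
  | succ n ih =>
    intro ms done rest active i hms hdone hrest hsort hact
    -- the step's new (done', rest')
    obtain ⟨done', rest', hsplit, hdone', hrest', hsort', happ⟩ :
        ∃ done' rest', ms = done' ++ rest' ∧ (∀ m ∈ done', m.1 ≤ i) ∧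
          (∀ m ∈ rest', i + 1 ≤ m.1) ∧ rest'.Pairwise (fun a b => a.1 < b.1) ∧
          pvStepB active rest i =
            (done'.filter (fun m => i ≤ m.1 + m.2.length), rest') := by
      cases rest with
      | nil =>
        refine ⟨done, [], by simpa using hms, fun m hm => le_of_lt (hdone m hm), by simp, by simp, ?_⟩
        simp [pvStepB, hact]
      | cons m rs =>
        by_cases hmi : m.1 = i
        · refine ⟨done ++ [m], rs, by simpa using hms,
            ?_, ?_, (List.pairwise_cons.mp hsort).2, ?_⟩
          · intro m' hm'
            rcases List.mem_append.mp hm' with h | h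
            · exact le_of_lt (hdone m' h)
            · simp at h; subst h; omega
          · intro m' hm'
            have := (List.pairwise_cons.mp hsort).1 m' hm'
            omega
          · simp only [pvStepB, hmi, beq_self_eq_true, if_pos]
            rw [List.filter_append, hact]
            simp [hmi]
        · refine ⟨done, m :: rs, hms, fun m' hm' => le_of_lt (hdone m' hm'), ?_, hsort, ?_⟩
          · intro m' hm'
            have h1 := hrest m' hm'
            rcases List.mem_cons.mp hm' with h | h
            · subst h; omega
            · have := (List.pairwise_cons.mp hsort).1 m' h
              have := hrest m (by simp)
              omega
          · simp only [pvStepB]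
            rw [if_neg (by simp [hmi])]
            rw [hact]
    have hfilters : (done'.filter (fun m => i ≤ m.1 + m.2.length)).filter
        (fun m => i < m.1 + m.2.length) = done'.filter (fun m => i + 1 ≤ m.1 + m.2.length) := by
      rw [List.filter_filter]
      apply List.filter_congr
      intro m _
      by_cases h : i < m.1 + m.2.length
      · simp [h, Nat.le_of_lt h]
      · simp [h]
    have hwin : done'.filter (fun m => i + 1 ≤ m.1 + m.2.length) = ms.filter (pvCovers i) := by
      rw [hsplit, List.filter_append]
      have h2 : rest'.filter (pvCovers i) = [] := by
        apply List.filter_eq_nil_iff.mpr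
        intro m hm
        have := hrest' m hm
        simp [pvCovers]; omega
      rw [h2, List.append_nil]
      apply List.filter_congr
      intro m hm
      have := hdone' m hm
      simp [pvCovers]; omega
    simp only [pvSweepB, happ, hfilters, hwin]
    rw [List.range'_succ, List.map_cons]
    congr 1
    exact ih ms done' rest' _ (i + 1) hsplit (fun m hm => by have := hdone' m hm; omega)
      hrest' hsort' (by rw [← hwin, ← hfilters])

-- column bounds of the collected markers
theorem pvCollect_bounds (cs : List Char) (j : Nat) (idx : Int) :
    ∀ m ∈ (pvCollect j idx cs).1, j ≤ m.1 ∧ m.1 < j + cs.length := by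
  induction cs generalizing j idx with
  | nil => simp [pvCollect]
  | cons c cs ih =>
    simp only [pvCollect]
    split
    · split
      · intro m hm
        simp only [List.mem_cons] at hm
        rcases hm with h | h
        · subst h; simp only [List.length_cons]; omega
        · have := ih (j + 1) _ m h; simp only [List.length_cons]; omega
      · intro m hm; have := ih (j + 1) _ m hm; simp only [List.length_cons]; omega
    · intro m hm; have := ih (j + 1) idx m hm; simp only [List.length_cons]; omega

-- marker columns strictly increase
theorem pvCollect_sorted (cs : List Char) (j : Nat) (idx : Int) :
    (pvCollect j idx cs).1.Pairwise (fun a b => a.1 < b.1) := by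
  induction cs generalizing j idx with
  | nil => simp [pvCollect]
  | cons c cs ih =>
    simp only [pvCollect]
    split
    · split
      · refine List.pairwise_cons.mpr ⟨?_, ih (j + 1) _⟩
        intro m hm
        have := (pvCollect_bounds cs (j + 1) _ m hm).1
        omega
      · exact ih (j + 1) _
    · exact ih (j + 1) idx

-- A's loop is the fold of writes over the collected markers, with the collected final index
theorem pvLoopA_eq_collect (cs : List Char) (t : List Char) (j : Nat) (idx : Int) :
    pvLoopA t idx j cs = (pvFoldA t (pvCollect j idx cs).1, (pvCollect j idx cs).2) := by
  induction cs generalizing t j idx with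
  | nil => simp [pvLoopA, pvCollect, pvFoldA]
  | cons c cs ih =>
    simp only [pvLoopA, pvCollect]
    split
    · split
      · simp only [ih]; rfl
      · exact ih ..
    · exact ih ..

theorem pv_le_foldl_max (ms : List (Nat × List Char)) (a : Nat) :
    a ≤ ms.foldl (fun a m => max a (m.1 + m.2.length)) a ∧
    ∀ m ∈ ms, m.1 + m.2.length ≤ ms.foldl (fun a m => max a (m.1 + m.2.length)) a := by
  induction ms generalizing a with
  | nil => simp
  | cons m ms ih =>
    obtain ⟨h1, h2⟩ := ih (max a (m.1 + m.2.length))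
    refine ⟨le_trans (by omega) h1, ?_⟩
    intro m' hm'
    simp only [List.mem_cons] at hm'
    rcases hm' with h | h
    · subst h; simpa using le_trans (by omega) h1
    · simpa using h2 m' h

-- a column below the fold-max but beyond `a` is below some marker's end
theorem pv_foldl_max_reached (ms : List (Nat × List Char)) (a i : Nat)
    (hi : i < ms.foldl (fun a m => max a (m.1 + m.2.length)) a) (ha : a ≤ i) :
    ∃ m ∈ ms, i < m.1 + m.2.length := by
  induction ms generalizing a with
  | nil => simp at hi; omega
  | cons m ms ih =>
    simp only [List.foldl_cons] at hi
    by_cases h : i < m.1 + m.2.length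
    · exact ⟨m, by simp, h⟩
    · obtain ⟨m', hm', h'⟩ := ih (max a (m.1 + m.2.length)) hi (by omega)
      exact ⟨m', by simp [hm'], h'⟩

-- ===== VERDICT (by name: the statement is the Claim_ definition above) =====
theorem build_number_track_spec : Claim_equal_build_number_track := by
  intro sequence start_idx _
  unfold Spec_build_number_track build_number_track build_number_track_alt
  simp only
  rw [pvLoopA_eq_collect]
  set cs := sequence.toList with hcs
  set ms := (pvCollect 0 start_idx cs).1 with hmsdef
  set L := ms.foldl (fun a m => max a (m.1 + m.2.length)) cs.length with hL
  refine Prod.ext ?_ rfl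
  simp only
  congr 1
  have hb := pvCollect_bounds cs 0 start_idx
  have hmax := pv_le_foldl_max ms cs.length
  have hcols : ∀ m ∈ ms, m.1 ≤ (List.replicate cs.length (' ' : Char)).length := by
    intro m hm
    have := (hb m hm).2
    simp; omega
  rw [pvSweepB_spec L ms [] ms [] 0 (by simp) (by simp) (fun m _ => Nat.zero_le _)
    (pvCollect_sorted cs 0 start_idx) (by simp)]
  apply List.ext_getElem?
  intro i
  rw [pvFoldA_getElem? ms _ hcols i, List.getElem?_map]
  by_cases hiL : i < L
  · rw [List.getElem?_range' (by simpa using hiL)]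
    simp only [Nat.one_mul, Nat.zero_add, Option.map_some]
    cases hlast : (ms.filter (pvCovers i)).getLast? with
    | some m =>
      have hmem : m ∈ ms.filter (pvCovers i) := List.mem_of_getLast? hlast
      have hcov' : m.1 ≤ i ∧ i < m.1 + m.2.length := by
        simpa [pvCovers] using List.of_mem_filter hmem
      have hrange : i - m.1 < m.2.length := by omega
      dsimp only
      rw [List.getElem?_eq_getElem hrange, List.getD_eq_getElem _ _ hrange]
    | none =>
      dsimp only
      by_cases hin : i < cs.length
      · rw [List.getElem?_replicate, if_pos hin]
      · -- i ∈ [cs.length, L): the marker whose end exceeds i has column < cs.length ≤ i,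
        -- so it covers i — contradicting the empty filter
        exfalso
        obtain ⟨m, hm, hend⟩ := pv_foldl_max_reached ms cs.length i hiL (by omega)
        have hcol := (hb m hm).2
        have hmem : m ∈ ms.filter (pvCovers i) :=
          List.mem_filter.mpr ⟨hm, by simp [pvCovers]; omega⟩
        rw [List.getLast?_eq_none_iff.mp hlast] at hmem
        simp at hmem
  · rw [List.getElem?_eq_none (l := List.range' 0 L) (by simp; omega)]
    simp only [Option.map_none]
    cases hlast : (ms.filter (pvCovers i)).getLast? with
    | some m =>
      -- a covering marker would put i below the fold-max L
      exfalso
      have hmem := List.mem_of_getLast? hlast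
      have hcov' : m.1 ≤ i ∧ i < m.1 + m.2.length := by
        simpa [pvCovers] using List.of_mem_filter hmem
      have := hmax.2 m (List.mem_of_mem_filter hmem)
      omega
    | none =>
      dsimp only
      rw [List.getElem?_eq_none (by simp; omega)]
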